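-- pv_equiv track=rewrite | github.com/Simon-Mufara/variant-filtering-dashboard | utils/auth.py | available_modes
-- ===== SOURCE A (Python) =====
-- from typing import Any, Dict, Mapping, Optional
--
-- VALID_ROLES = {"admin", "org_admin", "team_member", "team", "individual"}
--
-- def _normalize_role(role: Any) -> str:
--     val = str(role or "individual").strip().lower()
--     if val == "team":
--         return "team_member"
--     return val if val in VALID_ROLES else "individual"
--
-- def can_access_mode(role: str, mode_name: str) -> bool:
--     """Role-based access checks for top-level app modes."""
--     role = _normalize_role(role)
--     allowed = {
--         "individual": {
--             "🔬 Single VCF",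
--             "📦 Batch Pipeline",
--         },
--         "team_member": {
--             "🔬 Single VCF",
--             "⚖️ Multi-VCF Compare",
--             "👨‍👩‍👧 Trio Analysis",
--             "🧫 Somatic (Tumor/Normal)",
--             "📦 Batch Pipeline",
--         },
--         "org_admin": {
--             "🔬 Single VCF",
--             "⚖️ Multi-VCF Compare",
--             "👨‍👩‍👧 Trio Analysis",
--             "🧫 Somatic (Tumor/Normal)",
--             "📦 Batch Pipeline",
--         },
--         "admin": {
--             "🔬 Single VCF",
--             "⚖️ Multi-VCF Compare",
--             "👨‍👩‍👧 Trio Analysis",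
--             "🧫 Somatic (Tumor/Normal)",
--             "📦 Batch Pipeline",
--             "🛠️ Admin Console",
--         },
--     }
--     return mode_name in allowed.get(role, set())
--
-- def available_modes(role: str) -> list[str]:
--     all_modes = [
--         "🔬 Single VCF",
--         "⚖️ Multi-VCF Compare",
--         "👨‍👩‍👧 Trio Analysis",
--         "🧫 Somatic (Tumor/Normal)",
--         "📦 Batch Pipeline",
--         "🛠️ Admin Console",
--     ]
--     return [m for m in all_modes if can_access_mode(role, m)]
-- ===== SOURCE B (Python) =====
-- VALID_ROLES = {"admin", "org_admin", "team_member", "team", "individual"}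
--
-- def _normalize_role(role):
--     val = str(role or "individual").strip().lower()
--     if val == "team":
--         return "team_member"
--     return val if val in VALID_ROLES else "individual"
--
-- _TEAM_MODES = [
--     "🔬 Single VCF",
--     "⚖️ Multi-VCF Compare",
--     "👨‍👩‍👧 Trio Analysis",
--     "🧫 Somatic (Tumor/Normal)",
--     "📦 Batch Pipeline",
-- ]
--
-- _MODES_BY_ROLE = {
--     "individual": ["🔬 Single VCF", "📦 Batch Pipeline"],
--     "team_member": _TEAM_MODES,
--     "org_admin": _TEAM_MODES,
--     "admin": _TEAM_MODES + ["🛠️ Admin Console"],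
-- }
--
-- def available_modes(role: str) -> list:
--     return list(_MODES_BY_ROLE.get(_normalize_role(role), _MODES_BY_ROLE["individual"]))
-- ===== Notes on version B (the rewrite author's own statement) =====
-- stated objective: simpler
-- what changed: B replaces the per-mode filtering loop over a nested role->set dict (rebuilt on every membership check) with a single role->ordered-mode-list table indexed once by the normalized role.
import Mathlib
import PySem

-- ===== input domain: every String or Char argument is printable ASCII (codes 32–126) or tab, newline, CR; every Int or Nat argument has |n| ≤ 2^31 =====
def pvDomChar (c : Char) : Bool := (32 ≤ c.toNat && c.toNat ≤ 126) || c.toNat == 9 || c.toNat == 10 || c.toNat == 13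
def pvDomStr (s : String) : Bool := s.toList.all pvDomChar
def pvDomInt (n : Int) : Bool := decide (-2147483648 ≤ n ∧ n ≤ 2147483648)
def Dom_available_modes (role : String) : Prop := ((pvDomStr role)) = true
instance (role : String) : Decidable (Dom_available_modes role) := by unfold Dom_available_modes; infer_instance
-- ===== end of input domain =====

-- ===== PORT A =====
-- shared helper: literal port of _normalize_role (both Pythons call it)
def pyNormRole (role : String) : String :=
  let val := PySem.Str.lower (PySem.Str.strip (if role = "" then "individual" else role))
  if val = "team" then "team_member"
  else if PySem.Set.contains (PySem.Set.ofList ["admin", "org_admin", "team_member", "team", "individual"]) val then val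
  else "individual"

def pyAllowed : PySem.Dict String (PySem.Set String) :=
  PySem.Dict.ofList
    [ ("individual", PySem.Set.ofList ["🔬 Single VCF", "📦 Batch Pipeline"])
    , ("team_member", PySem.Set.ofList ["🔬 Single VCF", "⚖️ Multi-VCF Compare", "👨‍👩‍👧 Trio Analysis", "🧫 Somatic (Tumor/Normal)", "📦 Batch Pipeline"])
    , ("org_admin", PySem.Set.ofList ["🔬 Single VCF", "⚖️ Multi-VCF Compare", "👨‍👩‍👧 Trio Analysis", "🧫 Somatic (Tumor/Normal)", "📦 Batch Pipeline"])
    , ("admin", PySem.Set.ofList ["🔬 Single VCF", "⚖️ Multi-VCF Compare", "👨‍👩‍👧 Trio Analysis", "🧫 Somatic (Tumor/Normal)", "📦 Batch Pipeline", "🛠️ Admin Console"]) ]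

def can_access_mode (role : String) (mode_name : String) : Bool :=
  PySem.Set.contains (PySem.Dict.getD pyAllowed (pyNormRole role) PySem.Set.empty) mode_name

def pyAllModes : List String :=
  ["🔬 Single VCF", "⚖️ Multi-VCF Compare", "👨‍👩‍👧 Trio Analysis", "🧫 Somatic (Tumor/Normal)", "📦 Batch Pipeline", "🛠️ Admin Console"]

def available_modes (role : String) : List String :=
  pyAllModes.filter (fun m => can_access_mode role m)

-- ===== PORT B =====
-- B: one role -> ordered-mode-list table, indexed once by the normalized role; no per-mode loop
def pyTeamModes : List String :=
  ["🔬 Single VCF", "⚖️ Multi-VCF Compare", "👨‍👩‍👧 Trio Analysis", "🧫 Somatic (Tumor/Normal)", "📦 Batch Pipeline"]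

def pyModesByRole : PySem.Dict String (List String) :=
  PySem.Dict.ofList
    [ ("individual", ["🔬 Single VCF", "📦 Batch Pipeline"])
    , ("team_member", pyTeamModes)
    , ("org_admin", pyTeamModes)
    , ("admin", pyTeamModes ++ ["🛠️ Admin Console"]) ]

def available_modes_alt (role : String) : List String :=
  PySem.Dict.getD pyModesByRole (pyNormRole role)
    (PySem.Dict.getD pyModesByRole "individual" [])

-- ===== PRECONDITION & SPEC =====
def Spec_available_modes (role : String) (out : List String) : Prop := out = available_modes_alt role
instance (role : String) (out : List String) : Decidable (Spec_available_modes role out) := by unfold Spec_available_modes; infer_instance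

-- ===== CLAIM (what is proved, stated in full; the proofs are below) =====
def Claim_equal_available_modes : Prop := ∀ (role : String), Dom_available_modes role → Spec_available_modes role (available_modes role)

-- ===== LEMMAS AND PROOFS =====

-- _normalize_role can only return one of the four canonical roles
theorem pyNormRole_cases (role : String) :
    pyNormRole role = "team_member" ∨ pyNormRole role = "admin" ∨
    pyNormRole role = "org_admin" ∨ pyNormRole role = "individual" := by
  unfold pyNormRole
  set v := PySem.Str.lower (PySem.Str.strip (if role = "" then "individual" else role)) with hv
  dsimp only
  split_ifs with h1 h2
  · left; rfl
  · simp [PySem.Set.contains, PySem.Set.ofList, PySem.Set.add] at h2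
    rcases h2 with h | h | h | h | h <;> simp [h] at h1 ⊢
  · right; right; right; rfl

-- ===== VERDICT (by name: the statement is the Claim_ definition above) =====
theorem available_modes_spec : Claim_equal_available_modes := by
  intro role _
  unfold Spec_available_modes available_modes available_modes_alt can_access_mode
  rcases pyNormRole_cases role with h | h | h | h <;> simp only [h] <;> decide
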